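-- pv_equiv track=rewrite | github.com/gunnerhowe/koba | vacp/src/vacp/security/sanitizer.py | check_for_prompt_leak
-- ===== SOURCE A (Python) =====
-- def check_for_prompt_leak(output: str, system_prompt: str) -> bool:
--     """
--     Check if output contains the system prompt (prompt leak attack).
--
--     Returns True if leak detected.
--     """
--     # Normalize both for comparison
--     output_norm = ' '.join(output.lower().split())
--     prompt_norm = ' '.join(system_prompt.lower().split())
--
--     # Check for significant overlap
--     # Use sliding window to find matches
--     window_size = min(50, len(prompt_norm))
--     if window_size < 20:
--         return False
--
--     for i in range(0, len(prompt_norm) - window_size, 10):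
--         window = prompt_norm[i:i + window_size]
--         if window in output_norm:
--             return True
--
--     return False
-- ===== SOURCE B (Python) =====
-- def check_for_prompt_leak(output: str, system_prompt: str) -> bool:
--     """Collect the prompt windows once into a hash set, then walk the output
--     once, testing each length-w slice against the set, instead of one full
--     substring search of the output per window."""
--     output_norm = ' '.join(output.lower().split())
--     prompt_norm = ' '.join(system_prompt.lower().split())
--
--     window_size = min(50, len(prompt_norm))
--     if window_size < 20:
--         return False
--
--     windows = set()
--     start = 0
--     while window_size + start < len(prompt_norm):
--         windows.add(prompt_norm[start:start + window_size])
--         start += 10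
--
--     j = 0
--     while window_size + j <= len(output_norm):
--         if output_norm[j:j + window_size] in windows:
--             return True
--         j += 1
--     return False
-- ===== Notes on version B (the rewrite author's own statement) =====
-- stated objective: faster
-- what changed: Instead of running one full substring search of the output per prompt window, B collects the windows once into a hash set by stepping down the prompt's suffixes, then walks the output's suffixes once, testing each length-w prefix for set membership.
import Mathlib
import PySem

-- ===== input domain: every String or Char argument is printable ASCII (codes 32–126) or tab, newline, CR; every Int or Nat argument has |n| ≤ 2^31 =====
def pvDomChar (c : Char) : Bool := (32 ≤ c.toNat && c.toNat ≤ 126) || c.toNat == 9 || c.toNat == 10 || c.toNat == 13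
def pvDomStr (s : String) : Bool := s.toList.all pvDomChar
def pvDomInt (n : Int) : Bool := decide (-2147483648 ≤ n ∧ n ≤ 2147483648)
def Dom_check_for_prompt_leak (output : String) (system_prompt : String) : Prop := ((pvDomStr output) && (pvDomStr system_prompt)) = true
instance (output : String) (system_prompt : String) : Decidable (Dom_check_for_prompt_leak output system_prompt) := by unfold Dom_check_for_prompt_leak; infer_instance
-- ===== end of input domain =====

-- B builds a hash set of the prompt windows once (stepping down the prompt's suffixes by 10)
-- and then walks the output's suffixes once, testing each length-w prefix for set membership,
-- instead of A's full substring search of the output per window (objective: faster).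

-- shared normalization helper: ' '.join(s.lower().split())
def pvNorm (s : String) : List Char :=
  PySem.Chars.join [' '] (PySem.Chars.split₀ (PySem.Chars.lower s.toList))

-- ===== PORT A =====
def check_for_prompt_leak (output : String) (system_prompt : String) : Bool :=
  let output_norm := pvNorm output
  let prompt_norm := pvNorm system_prompt
  let window_size : Int := min 50 (prompt_norm.length : Int)
  if window_size < 20 then false
  else
    -- for i in range(0, len(prompt_norm) - window_size, 10): if window in output_norm: return True
    (PySem.List.pyRange 0 ((prompt_norm.length : Int) - window_size) 10).any
      (fun i => PySem.Chars.isIn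
        (PySem.Chars.slice prompt_norm (some i) (some (i + window_size))) output_norm)

-- ===== PORT B =====
-- B's loops advance an index through a string; the port carries the remaining suffix
-- rest = s[start:] instead of the index (the slice examined at each step is the same).
-- while window_size + start < len(prompt_norm): windows.add(prompt_norm[start:start+window_size]); start += 10
def pvWindowsGo (wn : Nat) (acc : PySem.Set (List Char)) (rest : List Char) :
    PySem.Set (List Char) :=
  if _h : wn < rest.length then
    pvWindowsGo wn (acc.add (rest.take wn)) (rest.drop 10)
  else acc
termination_by rest.length
decreasing_by simpa using by omega

-- while window_size + j <= len(output_norm): if output_norm[j:j+window_size] in windows: return True; j += 1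
-- (structural recursion on the suffix output_norm[j:]; only ever called with 20 ≤ wn, where it is exact)
def pvScanGo (wn : Nat) (windows : PySem.Set (List Char)) : List Char → Bool
  | [] => false
  | c :: cs =>
      if wn ≤ cs.length + 1 then
        windows.contains (List.take wn (c :: cs)) || pvScanGo wn windows cs
      else false

def check_for_prompt_leak_alt (output : String) (system_prompt : String) : Bool :=
  let output_norm := pvNorm output
  let prompt_norm := pvNorm system_prompt
  let window_size := min 50 prompt_norm.length
  if window_size < 20 then false
  else
    pvScanGo window_size (pvWindowsGo window_size PySem.Set.empty prompt_norm) output_norm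

-- ===== PRECONDITION & SPEC =====
def Spec_check_for_prompt_leak (output : String) (system_prompt : String) (out : Bool) : Prop := out = check_for_prompt_leak_alt output system_prompt
instance (output : String) (system_prompt : String) (out : Bool) : Decidable (Spec_check_for_prompt_leak output system_prompt out) := by unfold Spec_check_for_prompt_leak; infer_instance

-- ===== CLAIM (what is proved, stated in full; the proofs are below) =====
def Claim_equal_check_for_prompt_leak : Prop := ∀ (output : String) (system_prompt : String), Dom_check_for_prompt_leak output system_prompt → Spec_check_for_prompt_leak output system_prompt (check_for_prompt_leak output system_prompt)

-- ===== LEMMAS AND PROOFS =====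

-- membership in the window set B collects
lemma mem_pvWindowsGo (wn : Nat) (acc : PySem.Set (List Char)) (rest : List Char)
    (x : List Char) :
    x ∈ pvWindowsGo wn acc rest ↔
      x ∈ acc ∨ ∃ k : Nat, wn + 10 * k < rest.length ∧ x = (rest.drop (10 * k)).take wn := by
  fun_induction pvWindowsGo wn acc rest with
  | case1 acc rest h ih =>
    rw [ih, PySem.Set.mem_add]
    constructor
    · rintro ((hx | rfl) | ⟨k, hk, rfl⟩)
      · exact .inl hx
      · exact .inr ⟨0, by simpa using h, by simp⟩
      · refine .inr ⟨k + 1, ?_, ?_⟩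
        · simp only [List.length_drop] at hk; omega
        · rw [List.drop_drop, show 10 + 10 * k = 10 * (k + 1) by ring]
    · rintro (hx | ⟨k, hk, rfl⟩)
      · exact .inl (.inl hx)
      · cases k with
        | zero => exact .inl (.inr (by simp))
        | succ k' =>
          refine .inr ⟨k', ?_, ?_⟩
          · simp only [List.length_drop]; omega
          · rw [List.drop_drop, show 10 + 10 * k' = 10 * (k' + 1) by ring]
  | case2 acc rest h =>
    constructor
    · exact .inl
    · rintro (hx | ⟨k, hk, -⟩)
      · exact hx
      · omega

-- what B's output scan computes (exact for 0 < wn)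
lemma pvScanGo_iff (wn : Nat) (W : PySem.Set (List Char)) (out : List Char) (hpos : 0 < wn) :
    pvScanGo wn W out = true ↔
      ∃ j : Nat, wn + j ≤ out.length ∧ W.contains ((out.drop j).take wn) = true := by
  induction out with
  | nil => simp [pvScanGo]; omega
  | cons c cs ih =>
    simp only [pvScanGo]
    split_ifs with h
    · rw [Bool.or_eq_true, ih]
      constructor
      · rintro (hc | ⟨j, hj, hc⟩)
        · exact ⟨0, by simpa using h, by simpa using hc⟩
        · exact ⟨j + 1, by simpa using by omega, by simpa using hc⟩
      · rintro ⟨j, hj, hc⟩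
        cases j with
        | zero => exact .inl (by simpa using hc)
        | succ j' => exact .inr ⟨j', by simp at hj ⊢; omega, by simpa using hc⟩
    · simp only [false_iff]
      rintro ⟨j, hj, -⟩
      simp only [List.length_cons] at hj
      omega

-- A length-wn pattern is a substring iff it is the length-wn prefix of some suffix
lemma isIn_iff_take_drop (win out : List Char) (wn : Nat)
    (hlen : win.length = wn) (hpos : 0 < wn) :
    PySem.Chars.isIn win out = true ↔
      ∃ j : Nat, wn + j ≤ out.length ∧ (out.drop j).take wn = win := by
  rw [← PySem.Chars.exists_prefix_drop_iff_isIn]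
  constructor
  · rintro ⟨j, hp⟩
    have ht := List.prefix_iff_eq_take.mp hp
    have hle := hp.length_le
    simp only [List.length_drop] at hle
    rw [hlen] at ht hle
    exact ⟨j, by omega, ht.symm⟩
  · rintro ⟨j, hj, ht⟩
    refine ⟨j, ?_⟩
    rw [List.prefix_iff_eq_take, hlen]
    exact ht.symm

-- ===== VERDICT (by name: the statement is the Claim_ definition above) =====
theorem check_for_prompt_leak_spec : Claim_equal_check_for_prompt_leak := by
  unfold Claim_equal_check_for_prompt_leak Spec_check_for_prompt_leak
  intro output system_prompt _
  simp only [check_for_prompt_leak, check_for_prompt_leak_alt]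
  set out := pvNorm output with hout
  set prompt := pvNorm system_prompt with hprompt
  rw [show (min 50 (prompt.length : Int)) = ((min 50 prompt.length : Nat) : Int) by omega]
  set wn : Nat := min 50 prompt.length with hwn
  by_cases h20 : wn < 20
  · rw [if_pos (by exact_mod_cast h20), if_pos h20]
  · rw [if_neg (by exact_mod_cast h20 : ¬((wn : Int) < 20)), if_neg h20]
    have hwpos : 0 < wn := by omega
    rw [Bool.eq_iff_iff, List.any_eq_true, pvScanGo_iff _ _ _ hwpos]
    constructor
    · rintro ⟨i, hi, hisin⟩
      rw [PySem.List.mem_pyRange_iff_of_pos (by norm_num)] at hi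
      obtain ⟨hi0, hilt, hdvd⟩ := hi
      obtain ⟨m, hm⟩ := hdvd
      have hm0 : 0 ≤ m := by omega
      obtain ⟨k, rfl⟩ : ∃ k : Nat, m = (k : Int) := ⟨m.toNat, (Int.toNat_of_nonneg hm0).symm⟩
      have hi_eq : i = ((10 * k : Nat) : Int) := by push_cast; omega
      subst hi_eq
      have hkL : wn + 10 * k < prompt.length := by push_cast at hilt; omega
      rw [PySem.Chars.slice_eq_listSlice, PySem.List.slice_natCast_add] at hisin
      have hlen : ((prompt.drop (10 * k)).take wn).length = wn := by
        simp only [List.length_take, List.length_drop]; omega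
      rw [isIn_iff_take_drop _ _ wn hlen hwpos] at hisin
      obtain ⟨j, hj, hteq⟩ := hisin
      refine ⟨j, hj, ?_⟩
      rw [PySem.Set.contains_iff, mem_pvWindowsGo]
      exact .inr ⟨k, hkL, hteq⟩
    · rintro ⟨j, hj, hcont⟩
      rw [PySem.Set.contains_iff, mem_pvWindowsGo] at hcont
      rcases hcont with h0 | ⟨k, hkL, heq⟩
      · exact absurd h0 (by simp [PySem.Set.empty])
      refine ⟨((10 * k : Nat) : Int), ?_, ?_⟩
      · rw [PySem.List.mem_pyRange_iff_of_pos (by norm_num)]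
        refine ⟨Int.natCast_nonneg _, by push_cast; omega, ⟨(k : Int), by push_cast; ring⟩⟩
      · rw [PySem.Chars.slice_eq_listSlice, PySem.List.slice_natCast_add]
        rw [isIn_iff_take_drop _ _ wn (by simp only [List.length_take, List.length_drop]; omega) hwpos]
        exact ⟨j, hj, heq ▸ rfl⟩
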